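-- pv_equiv track=rewrite | github.com/data-integration-toolkit/ditk | extraction/named_entity/gcn-ner/gcn_ner/utils/tuples/__init__.py | join_consecutive_tuples
-- ===== SOURCE A (Python) =====
-- def join_consecutive_tuples(tuples):
--     for i in range(len(tuples) - 1):
--         curr_type = tuples[i][1]
--         curr_end_idx = tuples[i][2][1]
--         next_type = tuples[i + 1][1]
--         next_start_idx = tuples[i + 1][2][0]
--         if curr_type == next_type and curr_end_idx == next_start_idx - 1:
--             curr_word = tuples[i][0]
--             next_word = tuples[i + 1][0]
--             curr_start_idx = tuples[i][2][0]
--             next_end_idx = tuples[i + 1][2][1]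
--             tuples[i + 1] = (curr_word + ' ' + next_word,
--                              curr_type,
--                              [curr_start_idx, next_end_idx])
--             tuples[i] = ()
--     tuples = [t for t in tuples if t]
--     return tuples
-- ===== SOURCE B (Python) =====
-- def join_consecutive_tuples(tuples):
--     # Single forward pass with a running `current` tuple; the input list is NOT
--     # mutated (the original blanks/overwrites entries of its argument in place).
--     result = []
--     current = None
--     for t in tuples:
--         if current is not None and t[1] == current[1] and t[2][0] == current[2][1] + 1:
--             current = (current[0] + ' ' + t[0], current[1], [current[2][0], t[2][1]])
--         else:
--             if current is not None:
--                 result.append(current)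
--             current = t
--     if current is not None:
--         result.append(current)
--     return result
-- ===== Notes on version B (the rewrite author's own statement) =====
-- stated objective: simpler
-- what changed: Replaces A's in-place blanking of merged entries with a () sentinel followed by a second truthiness-filtering pass by one forward pass that keeps a running `current` tuple and appends it to a fresh result list when the chain breaks; B also leaves the argument list unmutated (A overwrites it in place), equivalence is about the return value.
import Mathlib
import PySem

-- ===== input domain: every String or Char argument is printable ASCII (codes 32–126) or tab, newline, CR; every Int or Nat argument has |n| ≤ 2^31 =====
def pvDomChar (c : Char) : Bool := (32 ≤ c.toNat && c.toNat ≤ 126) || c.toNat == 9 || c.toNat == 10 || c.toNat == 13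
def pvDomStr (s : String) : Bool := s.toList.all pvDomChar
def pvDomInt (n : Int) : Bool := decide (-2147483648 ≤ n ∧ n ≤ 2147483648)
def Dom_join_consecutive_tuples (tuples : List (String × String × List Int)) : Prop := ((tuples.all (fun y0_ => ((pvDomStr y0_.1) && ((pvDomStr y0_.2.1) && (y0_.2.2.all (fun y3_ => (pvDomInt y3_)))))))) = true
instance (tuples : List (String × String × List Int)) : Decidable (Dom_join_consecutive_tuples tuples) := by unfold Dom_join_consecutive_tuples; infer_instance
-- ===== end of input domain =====

-- B replaces A's in-place sentinel-() overwrite plus a second filtering pass by one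
-- forward pass with an accumulator (objective: simpler); equivalence is about the
-- RETURN value only — A mutates its argument list in place, B leaves it untouched.

-- ===== PORT A =====
-- Python's empty-tuple sentinel `()` is modeled as `none` in a List (Option _);
-- the final truthiness filter `[t for t in tuples if t]` is `filterMap id`
-- (a 3-tuple is always truthy, `()` never is).
def pvCondA (c n : String × String × List Int) : Bool :=
  c.2.1 == n.2.1 && PySem.List.pyGetD c.2.2 1 0 == PySem.List.pyGetD n.2.2 0 0 - 1

def pvMergeA (c n : String × String × List Int) : String × String × List Int :=
  (c.1 ++ " " ++ n.1, c.2.1, [PySem.List.pyGetD c.2.2 0 0, PySem.List.pyGetD n.2.2 1 0])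

def pvStepA (ts : List (Option (String × String × List Int))) (i : Nat) :
    List (Option (String × String × List Int)) :=
  match ts[i]?, ts[i+1]? with
  | some (some c), some (some n) =>
      if pvCondA c n then (ts.set (i+1) (some (pvMergeA c n))).set i none else ts
  | _, _ => ts

def join_consecutive_tuples (tuples : List (String × String × List Int)) : List (String × String × List Int) :=
  (((List.range (tuples.length - 1)).foldl pvStepA (tuples.map some)).filterMap id)

-- ===== PORT B =====
def pvCondB (cur t : String × String × List Int) : Bool :=
  t.2.1 == cur.2.1 && PySem.List.pyGetD t.2.2 0 0 == PySem.List.pyGetD cur.2.2 1 0 + 1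

def pvMergeB (cur t : String × String × List Int) : String × String × List Int :=
  (cur.1 ++ " " ++ t.1, cur.2.1, [PySem.List.pyGetD cur.2.2 0 0, PySem.List.pyGetD t.2.2 1 0])

def pvStepB (s : List (String × String × List Int) × Option (String × String × List Int))
    (t : String × String × List Int) :
    List (String × String × List Int) × Option (String × String × List Int) :=
  match s.2 with
  | some cur => if pvCondB cur t then (s.1, some (pvMergeB cur t)) else (s.1 ++ [cur], some t)
  | none => (s.1, some t)

def join_consecutive_tuples_alt (tuples : List (String × String × List Int)) : List (String × String × List Int) :=
  let s := tuples.foldl pvStepB ([], none)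
  match s.2 with
  | some cur => s.1 ++ [cur]
  | none => s.1

-- ===== PRECONDITION & SPEC =====
-- Exactly the inputs on which Python A returns (no IndexError): each adjacent pair
-- needs the left index list to have ≥ 2 elements, the right ≥ 1, and ≥ 2 if the
-- pair merges (A then reads its second index).
def Pre_join_consecutive_tuples (tuples : List (String × String × List Int)) : Prop :=
  List.IsChain (fun c n => 2 ≤ c.2.2.length ∧ 1 ≤ n.2.2.length ∧
    ((c.2.1 = n.2.1 ∧ c.2.2.getD 1 0 = n.2.2.getD 0 0 - 1) → 2 ≤ n.2.2.length)) tuples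
instance (tuples : List (String × String × List Int)) : Decidable (Pre_join_consecutive_tuples tuples) := by unfold Pre_join_consecutive_tuples; infer_instance

def pvWitness_join_consecutive_tuples : (List (String × String × List Int)) :=
  [("New", "LOC", [0, 1]), ("York", "LOC", [2, 3]), ("he", "PER", [7, 8])]

def Spec_join_consecutive_tuples (tuples : List (String × String × List Int)) (out : List (String × String × List Int)) : Prop := out = join_consecutive_tuples_alt tuples
instance (tuples : List (String × String × List Int)) (out : List (String × String × List Int)) : Decidable (Spec_join_consecutive_tuples tuples out) := by unfold Spec_join_consecutive_tuples; infer_instance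

-- ===== CLAIM (what is proved, stated in full; the proofs are below) =====
def Claim_equal_join_consecutive_tuples : Prop := ∀ (tuples : List (String × String × List Int)), Dom_join_consecutive_tuples tuples → Pre_join_consecutive_tuples tuples → Spec_join_consecutive_tuples tuples (join_consecutive_tuples tuples)

-- ===== LEMMAS AND PROOFS =====

-- The two merge conditions agree.
theorem pvCond_eq (c n : String × String × List Int) : pvCondA c n = pvCondB c n := by
  unfold pvCondA pvCondB
  rw [Bool.eq_iff_iff]
  simp only [Bool.and_eq_true, beq_iff_eq]
  constructor <;> rintro ⟨h1, h2⟩ <;> exact ⟨h1.symm, by omega⟩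

-- Proof-side reference loop: the joined suffix given the running `current`.
def pvLoop (cur : String × String × List Int) :
    List (String × String × List Int) → List (String × String × List Int)
  | [] => [cur]
  | t :: rest => if pvCondB cur t then pvLoop (pvMergeB cur t) rest else cur :: pvLoop t rest

-- B's fold computes pvLoop.
theorem bFold_eq (rest : List (String × String × List Int))
    (cur : String × String × List Int) (acc : List (String × String × List Int)) :
    (match (rest.foldl pvStepB (acc, some cur)).2 with
      | some c => (rest.foldl pvStepB (acc, some cur)).1 ++ [c]
      | none => (rest.foldl pvStepB (acc, some cur)).1) = acc ++ pvLoop cur rest := by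
  induction rest generalizing cur acc with
  | nil => simp [pvLoop]
  | cons t rs ih =>
    simp only [List.foldl_cons, pvStepB, pvLoop]
    by_cases h : pvCondB cur t = true
    · simp [h, ih]
    · simp only [Bool.not_eq_true] at h
      simp [h, ih, List.append_assoc]

-- A's index fold, started after a finalized prefix `pre`, computes pvLoop too.
theorem aFold_eq (rest : List (String × String × List Int))
    (cur : String × String × List Int)
    (pre : List (Option (String × String × List Int))) :
    (((List.range' pre.length rest.length).foldl pvStepA
        (pre ++ some cur :: rest.map some)).filterMap id)
      = pre.filterMap id ++ pvLoop cur rest := by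
  induction rest generalizing cur pre with
  | nil => simp [pvLoop]
  | cons t rs ih =>
    simp only [List.map_cons, List.length_cons, List.range'_succ, List.foldl_cons]
    have hstep : pvStepA (pre ++ some cur :: some t :: rs.map some) pre.length =
        if pvCondA cur t then pre ++ none :: some (pvMergeA cur t) :: rs.map some
        else pre ++ some cur :: some t :: rs.map some := by
      unfold pvStepA
      have h0 : (pre ++ some cur :: some t :: rs.map some)[pre.length]? = some (some cur) := by
        simp
      have h1 : (pre ++ some cur :: some t :: rs.map some)[pre.length + 1]? = some (some t) := by
        rw [List.getElem?_append_right (by omega)]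
        simp
      rw [h0, h1]
      by_cases h : pvCondA cur t = true
      · simp only [h, if_true]
        rw [List.set_append_right _ _ (by omega), List.set_append_right _ _ (by omega)]
        simp
      · simp only [Bool.not_eq_true] at h
        simp [h]
    rw [hstep]
    by_cases h : pvCondA cur t = true
    · simp only [h, if_true]
      have := ih (pvMergeA cur t) (pre ++ [none])
      simp only [List.length_append, List.length_cons, List.length_nil, Nat.zero_add,
        List.append_assoc, List.cons_append, List.nil_append] at this ⊢
      rw [this]
      have hc : pvCondB cur t = true := by rw [← pvCond_eq]; exact h
      have hm : pvMergeA cur t = pvMergeB cur t := rfl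
      simp [pvLoop, hc, hm]
    · simp only [Bool.not_eq_true] at h
      simp only [h, Bool.false_eq_true, if_false]
      have := ih t (pre ++ [some cur])
      simp only [List.length_append, List.length_cons, List.length_nil, Nat.zero_add,
        List.append_assoc, List.cons_append, List.nil_append] at this ⊢
      rw [this]
      have hc : pvCondB cur t = false := by rw [← pvCond_eq]; exact h
      simp [pvLoop, hc]

theorem ports_agree (tuples : List (String × String × List Int)) :
    join_consecutive_tuples tuples = join_consecutive_tuples_alt tuples := by
  cases tuples with
  | nil => rfl
  | cons t rest =>
    unfold join_consecutive_tuples join_consecutive_tuples_alt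
    simp only [List.foldl_cons, pvStepB, List.length_cons, Nat.add_sub_cancel,
      List.map_cons]
    have hA := aFold_eq rest t []
    simp only [List.length_nil, List.filterMap_nil, List.nil_append] at hA
    rw [List.range_eq_range', hA, bFold_eq rest t []]
    simp

-- ===== VERDICT (by name: the statement is the Claim_ definition above) =====
theorem join_consecutive_tuples_spec : Claim_equal_join_consecutive_tuples := by
  intro tuples _ _
  unfold Spec_join_consecutive_tuples
  exact ports_agree tuples
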